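-- pv_equiv track=rewrite | github.com/shreyas-shrestha/easify | app/autocorrect/engine.py | _split_punct
-- ===== SOURCE A (Python) =====
-- def _split_punct(token: str) -> tuple[str, str, str]:
--     i = 0
--     j = len(token)
--     while i < j and not token[i].isalnum():
--         i += 1
--     while j > i and not token[j - 1].isalnum():
--         j -= 1
--     return token[:i], token[i:j], token[j:]
-- ===== SOURCE B (Python) =====
-- def _split_punct(token: str) -> tuple[str, str, str]:
--     first = -1
--     last = -1
--     for idx, ch in enumerate(token):
--         if ch.isalnum():
--             if first < 0:
--                 first = idx
--             last = idx
--     if first < 0: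
--         return token, '', ''
--     return token[:first], token[first:last + 1], token[last + 1:]
-- ===== Notes on version B (the rewrite author's own statement) =====
-- stated objective: simpler
-- what changed: Replaces A's two converging index while-loops with a single forward enumerate pass that records the first and last alphanumeric indices, then slices once.
import Mathlib
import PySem

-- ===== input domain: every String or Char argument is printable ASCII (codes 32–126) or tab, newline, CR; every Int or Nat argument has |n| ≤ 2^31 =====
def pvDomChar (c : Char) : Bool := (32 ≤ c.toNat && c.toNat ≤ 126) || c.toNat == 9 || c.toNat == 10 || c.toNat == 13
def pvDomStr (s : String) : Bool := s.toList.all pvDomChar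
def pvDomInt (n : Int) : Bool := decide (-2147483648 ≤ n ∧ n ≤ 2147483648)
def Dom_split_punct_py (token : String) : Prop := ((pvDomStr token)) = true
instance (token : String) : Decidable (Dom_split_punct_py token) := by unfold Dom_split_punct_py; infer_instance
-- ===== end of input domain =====

-- B replaces A's two converging while-loops with a single forward enumerate pass that records
-- the first and last alphanumeric indices and slices once at the end (objective: simpler).

-- ===== PORT A =====
-- while i < j and not token[i].isalnum(): i += 1   (token[i] is always in range here, so getD is exact)
def pvALoopI (t : List Char) (j : Nat) (i : Nat) : Nat :=
  if h : i < j ∧ PySem.Chars.isalnum (t.getD i ' ') = false then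
    pvALoopI t j (i + 1)
  else i
termination_by j - i
decreasing_by omega

-- while j > i and not token[j-1].isalnum(): j -= 1   (token[j-1] is always in range here)
def pvALoopJ (t : List Char) (i : Nat) (j : Nat) : Nat :=
  if h : i < j ∧ PySem.Chars.isalnum (t.getD (j - 1) ' ') = false then
    pvALoopJ t i (j - 1)
  else j
termination_by j
decreasing_by omega

def split_punct_py (token : String) : String × String × String :=
  let t := token.toList
  let i := pvALoopI t t.length 0
  let j := pvALoopJ t i t.length
  (String.ofList (PySem.List.slice t none (some (i : Int))),
   String.ofList (PySem.List.slice t (some (i : Int)) (some (j : Int))),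
   String.ofList (PySem.List.slice t (some (j : Int)) none))

-- ===== PORT B =====
-- loop body: if ch.isalnum(): first = idx if first < 0 else first; last = idx
def pvBStep (st : Int × Int) (p : Int × Char) : Int × Int :=
  if PySem.Chars.isalnum p.2 then ((if st.1 < 0 then p.1 else st.1), p.1) else st

def split_punct_py_alt (token : String) : String × String × String :=
  let t := token.toList
  let fl := (PySem.List.enumerate t 0).foldl pvBStep (-1, -1)
  if fl.1 < 0 then (token, "", "")
  else
    (String.ofList (PySem.List.slice t none (some fl.1)),
     String.ofList (PySem.List.slice t (some fl.1) (some (fl.2 + 1))),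
     String.ofList (PySem.List.slice t (some (fl.2 + 1)) none))

-- ===== PRECONDITION & SPEC =====
def Spec_split_punct_py (token : String) (out : String × String × String) : Prop := out = split_punct_py_alt token
instance (token : String) (out : String × String × String) : Decidable (Spec_split_punct_py token out) := by unfold Spec_split_punct_py; infer_instance

-- ===== CLAIM (what is proved, stated in full; the proofs are below) =====
def Claim_equal_split_punct_py : Prop := ∀ (token : String), Dom_split_punct_py token → Spec_split_punct_py token (split_punct_py token)

-- ===== LEMMAS AND PROOFS =====

-- A's first while-loop advances i to the first alphanumeric index at or after i (or to the end).
theorem pvALoopI_eq (t : List Char) (i : Nat) (hi : i ≤ t.length) :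
    pvALoopI t t.length i = i + List.findIdx PySem.Chars.isalnum (t.drop i) := by
  by_cases hlt : i < t.length
  · have hdrop : t.drop i = t[i] :: t.drop (i + 1) := List.drop_eq_getElem_cons hlt
    have hgd : t.getD i ' ' = t[i] := by
      simp [List.getD, List.getElem?_eq_getElem hlt]
    rw [pvALoopI]
    by_cases hp : PySem.Chars.isalnum t[i] = true
    · rw [dif_neg (by rintro ⟨-, h2⟩; rw [hgd] at h2; simp [hp] at h2)]
      rw [hdrop, List.findIdx_cons, hp]
      simp
    · simp only [Bool.not_eq_true] at hp
      rw [dif_pos ⟨hlt, by rw [hgd]; exact hp⟩]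
      rw [pvALoopI_eq t (i+1) hlt, hdrop, List.findIdx_cons, hp]
      simp [Nat.add_assoc, Nat.add_comm 1]
  · have hie : i = t.length := by omega
    subst hie
    rw [pvALoopI]
    simp
termination_by t.length - i
decreasing_by omega

-- A's second while-loop retreats j past the trailing non-alphanumerics of token[i:j].
theorem pvALoopJ_eq (t : List Char) (i j : Nat) (hij : i ≤ j) (hj : j ≤ t.length) :
    pvALoopJ t i j = j - List.findIdx PySem.Chars.isalnum (((t.take j).drop i).reverse) := by
  by_cases hlt : i < j
  · have hj1 : j - 1 < t.length := by omega
    have hgd : t.getD (j - 1) ' ' = t[j - 1] := by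
      simp [List.getD, List.getElem?_eq_getElem hj1]
    have htake : t.take j = t.take (j - 1) ++ [t[j - 1]] := by
      have : j = (j - 1) + 1 := by omega
      conv_lhs => rw [this]
      rw [List.take_add_one]
      simp [List.getElem?_eq_getElem hj1]
    have hlen : (t.take (j - 1)).length = j - 1 := by
      simp; omega
    have hseg : ((t.take j).drop i).reverse
        = t[j - 1] :: ((t.take (j - 1)).drop i).reverse := by
      rw [htake, List.drop_append]
      have : i - (t.take (j - 1)).length = 0 := by omega
      rw [this]
      simp
    rw [pvALoopJ, hseg, List.findIdx_cons]
    by_cases hp : PySem.Chars.isalnum t[j - 1] = true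
    · rw [dif_neg (by rintro ⟨-, h2⟩; rw [hgd] at h2; simp [hp] at h2)]
      simp [hp]
    · simp only [Bool.not_eq_true] at hp
      rw [dif_pos ⟨hlt, by rw [hgd]; exact hp⟩]
      rw [pvALoopJ_eq t i (j - 1) (by omega) (by omega), hp]
      have hfle : List.findIdx PySem.Chars.isalnum (((t.take (j-1)).drop i).reverse)
          ≤ j - 1 - i := by
        have := List.findIdx_le_length (p := PySem.Chars.isalnum)
          (xs := ((t.take (j-1)).drop i).reverse)
        simpa [hlen] using this
      simp; omega
  · have : i = j := by omega
    subst this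
    rw [pvALoopJ]
    simp

-- B's fold yields (-1,-1) on an all-punctuation list, else the first and last alphanumeric indices.
theorem pvFold_eq (t : List Char) (s : Int) (st : Int × Int) (hs : 0 ≤ s) :
    (PySem.List.enumerate t s).foldl pvBStep st =
      if ∀ c ∈ t, PySem.Chars.isalnum c = false then st
      else ((if st.1 < 0 then s + (List.findIdx PySem.Chars.isalnum t : Int) else st.1),
            s + (t.length : Int) - 1 - (List.findIdx PySem.Chars.isalnum t.reverse : Int)) := by
  induction t generalizing s st with
  | nil => simp [PySem.List.enumerate_nil]
  | cons x xs ih =>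
    rw [PySem.List.enumerate_cons, List.foldl_cons]
    by_cases hx : PySem.Chars.isalnum x = true
    · have hstep : pvBStep st (s, x) = ((if st.1 < 0 then s else st.1), s) := by
        simp [pvBStep, hx]
      rw [hstep, ih (s + 1) _ (by omega)]
      have hne : ¬ (∀ c ∈ x :: xs, PySem.Chars.isalnum c = false) := by
        intro h; have := h x (by simp); rw [hx] at this; cases this
      rw [if_neg hne]
      have hfx : List.findIdx PySem.Chars.isalnum (x :: xs) = 0 := by
        simp [List.findIdx_cons, hx]
      by_cases hxs : ∀ c ∈ xs, PySem.Chars.isalnum c = false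
      · rw [if_pos hxs]
        have hrev : List.findIdx PySem.Chars.isalnum (x :: xs).reverse = xs.length := by
          rw [List.reverse_cons, List.findIdx_append]
          have h1 : List.findIdx PySem.Chars.isalnum xs.reverse = xs.reverse.length := by
            rw [List.findIdx_eq_length]; intro c hc; exact hxs c (List.mem_reverse.mp hc)
          rw [h1]
          simp [List.findIdx_cons, hx]
        rw [hfx, hrev]
        simp only [Prod.mk.injEq]
        constructor
        · split_ifs <;> simp
        · simp; ring
      · rw [if_neg hxs]
        have hxsrev : List.findIdx PySem.Chars.isalnum xs.reverse < xs.reverse.length := by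
          rw [List.findIdx_lt_length]
          push Not at hxs
          obtain ⟨c, hc, hcp⟩ := hxs
          exact ⟨c, List.mem_reverse.mpr hc, by simpa using hcp⟩
        have hrev : List.findIdx PySem.Chars.isalnum (x :: xs).reverse
            = List.findIdx PySem.Chars.isalnum xs.reverse := by
          rw [List.reverse_cons, List.findIdx_append, if_pos hxsrev]
        have hfst : ¬ ((if st.1 < 0 then s else st.1) < 0) := by
          split_ifs with h1 <;> omega
        rw [if_neg hfst, hfx, hrev]
        simp only [Prod.mk.injEq]
        constructor
        · split_ifs <;> simp
        · simp; ring
    · simp only [Bool.not_eq_true] at hx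
      have hstep : pvBStep st (s, x) = st := by simp [pvBStep, hx]
      rw [hstep, ih (s + 1) _ (by omega)]
      by_cases hxs : ∀ c ∈ xs, PySem.Chars.isalnum c = false
      · rw [if_pos hxs, if_pos (by intro c hc; rcases List.mem_cons.mp hc with h | h
                                   · subst h; exact hx
                                   · exact hxs c h)]
      · have hne : ¬ (∀ c ∈ x :: xs, PySem.Chars.isalnum c = false) := by
          intro h; exact hxs (fun c hc => h c (List.mem_cons_of_mem _ hc))
        rw [if_neg hxs, if_neg hne]
        have hxsrev : List.findIdx PySem.Chars.isalnum xs.reverse < xs.reverse.length := by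
          rw [List.findIdx_lt_length]
          push Not at hxs
          obtain ⟨c, hc, hcp⟩ := hxs
          exact ⟨c, List.mem_reverse.mpr hc, by simpa using hcp⟩
        have hrev : List.findIdx PySem.Chars.isalnum (x :: xs).reverse
            = List.findIdx PySem.Chars.isalnum xs.reverse := by
          rw [List.reverse_cons, List.findIdx_append, if_pos hxsrev]
        have hfx : List.findIdx PySem.Chars.isalnum (x :: xs)
            = List.findIdx PySem.Chars.isalnum xs + 1 := by
          simp [List.findIdx_cons, hx]
        rw [hfx, hrev]
        simp only [Prod.mk.injEq]
        constructor
        · split_ifs <;> push_cast <;> ring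
        · simp; ring

theorem split_punct_py_main (token : String) : split_punct_py token = split_punct_py_alt token := by
  simp only [split_punct_py, split_punct_py_alt]
  set t := token.toList with ht
  have hi : pvALoopI t t.length 0 = List.findIdx PySem.Chars.isalnum t := by
    simpa using pvALoopI_eq t 0 (by omega)
  rw [pvFold_eq t 0 (-1, -1) le_rfl]
  by_cases hall : ∀ c ∈ t, PySem.Chars.isalnum c = false
  · rw [if_pos hall]
    have hf : List.findIdx PySem.Chars.isalnum t = t.length := List.findIdx_eq_length.mpr hall
    rw [hi, hf]
    have hj : pvALoopJ t t.length t.length = t.length := by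
      rw [pvALoopJ_eq t t.length t.length le_rfl le_rfl]
      simp
    rw [hj]
    simp [PySem.List.slice_to_natCast, PySem.List.slice_natCast, PySem.List.slice_from_natCast, ht]
    rw [List.take_of_length_le (by simp), String.ofList_toList]
  · rw [if_neg hall]
    have hex : ∃ c ∈ t, PySem.Chars.isalnum c = true := by
      push Not at hall; obtain ⟨c, hc, hcp⟩ := hall; exact ⟨c, hc, by simpa using hcp⟩
    set f := List.findIdx PySem.Chars.isalnum t with hfdef
    set k := List.findIdx PySem.Chars.isalnum t.reverse with hkdef
    have hfn : f < t.length := List.findIdx_lt_length.mpr hex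
    have hkn : k < t.length := by
      have hexr : ∃ c ∈ t.reverse, PySem.Chars.isalnum c = true := by
        obtain ⟨c, hc, hcp⟩ := hex; exact ⟨c, List.mem_reverse.mpr hc, hcp⟩
      simpa using List.findIdx_lt_length.mpr hexr
    -- the j-loop stops exactly at t.length - k
    have hsplit : (t.drop f).reverse ++ (t.take f).reverse = t.reverse := by
      rw [← List.reverse_append, List.take_append_drop]
    have hdropex : List.findIdx PySem.Chars.isalnum (t.drop f).reverse
        < (t.drop f).reverse.length := by
      apply List.findIdx_lt_length.mpr
      refine ⟨t[f], ?_, ?_⟩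
      · rw [List.mem_reverse]
        rw [List.drop_eq_getElem_cons hfn]; exact List.mem_cons_self
      · exact List.findIdx_getElem (w := hfn)
    have hkeq : List.findIdx PySem.Chars.isalnum (t.drop f).reverse = k := by
      rw [hkdef, ← hsplit, List.findIdx_append, if_pos hdropex]
    rw [hi]
    have hj : pvALoopJ t f t.length = t.length - k := by
      rw [pvALoopJ_eq t f t.length (le_of_lt hfn) le_rfl, List.take_length, hkeq]
    rw [hj]
    rw [if_pos (show (-1 : Int) < 0 by norm_num)]
    rw [if_neg (show ¬ ((0 : Int) + (f : Int) < 0) by omega)]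
    have e1 : (0 : Int) + (f : Int) = ((f : Nat) : Int) := by omega
    have e2 : (0 : Int) + (t.length : Int) - 1 - (k : Int) + 1 = ((t.length - k : Nat) : Int) := by
      omega
    rw [e1, e2]

-- ===== VERDICT (by name: the statement is the Claim_ definition above) =====
theorem split_punct_py_spec : Claim_equal_split_punct_py := by
  intro token _
  unfold Spec_split_punct_py
  exact split_punct_py_main token
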